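-- pv_equiv track=rewrite | github.com/JimothyJohn/datasheetminer | datasheetminer/pricing/resolver.py | source_type_for_domain
-- ===== SOURCE A (Python) =====
-- from typing import Iterable, List, Literal, Optional
--
-- SourceType = Literal["oem", "distributor", "aggregator", "serp"]
--
-- _OEM_DOMAINS: dict[str, str] = {
--     "orientalmotor.com": "Oriental Motor",
--     "maxongroup.com": "Maxon Group",
--     "automationdirect.com": "AutomationDirect",
--     "se.com": "Schneider Electric",
--     # Mitsubishi's US factory-automation store publishes JSON-LD list prices
--     # per part number. Confirmed live on HG-KR43.
--     "shop1.us.mitsubishielectric.com": "Mitsubishi Electric (official store)",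
-- }
--
-- _DISTRIBUTOR_DOMAINS: dict[str, str] = {
--     "galco.com": "Galco",
--     "wolfautomation.com": "Wolf Automation",
--     "motionindustries.com": "Motion Industries",
--     "newark.com": "Newark",
--     "alliedelec.com": "Allied Electronics",
--     "grainger.com": "Grainger",
--     # Kyklo-backed storefronts. Same JSON-LD Product.offers.price scheme
--     # as shop1.us.mitsubishielectric.com; URL pattern is /products/{pn}
--     # with a redirect to / when the part isn't carried (handled by the
--     # fetcher's redirect-to-root guard).
--     "shop.iecsupply.com": "IEC Supply",  # Phoenix Contact, Rittal
--     "shop.lakewoodautomation.com": "Lakewood Automation",  # Omron, Wago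
--     "shop.lakelandengineering.com": "Lakeland Engineering",  # ABB, Crouzet, Dynapar, Marathon Special
--     "shop.fabco-air.com": "Fabco-Air",  # fluid power + Fabco-Air own brand
-- }
--
-- _AGGREGATOR_DOMAINS: dict[str, str] = {
--     "radwell.com": "Radwell International",
--     "plccenter.com": "PLC Center",
-- }
--
-- def source_type_for_domain(netloc: str) -> Optional[SourceType]:
--     """Classify a URL's netloc into our tier system."""
--     host = netloc.lower().lstrip(".")
--     # strip leading "www."
--     if host.startswith("www."):
--         host = host[4:]
--     for d in _OEM_DOMAINS:
--         if host == d or host.endswith("." + d):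
--             return "oem"
--     for d in _DISTRIBUTOR_DOMAINS:
--         if host == d or host.endswith("." + d):
--             return "distributor"
--     for d in _AGGREGATOR_DOMAINS:
--         if host == d or host.endswith("." + d):
--             return "aggregator"
--     return None
-- ===== SOURCE B (Python) =====
-- from typing import Optional, Literal
--
-- SourceType = Literal["oem", "distributor", "aggregator", "serp"]
--
-- _TIER_BY_DOMAIN: dict[str, str] = {
--     "orientalmotor.com": "oem",
--     "maxongroup.com": "oem",
--     "automationdirect.com": "oem",
--     "se.com": "oem",
--     "shop1.us.mitsubishielectric.com": "oem",
--     "galco.com": "distributor",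
--     "wolfautomation.com": "distributor",
--     "motionindustries.com": "distributor",
--     "newark.com": "distributor",
--     "alliedelec.com": "distributor",
--     "grainger.com": "distributor",
--     "shop.iecsupply.com": "distributor",
--     "shop.lakewoodautomation.com": "distributor",
--     "shop.lakelandengineering.com": "distributor",
--     "shop.fabco-air.com": "distributor",
--     "radwell.com": "aggregator",
--     "plccenter.com": "aggregator",
-- }
--
-- def source_type_for_domain(netloc: str) -> Optional[SourceType]:
--     """Classify a URL's netloc into our tier system.
--
--     Walks the host's dot-boundary suffixes most-specific-first and returns
--     the tier of the first suffix listed in the combined domain->tier table.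
--     """
--     host = netloc.lower().lstrip(".")
--     if host.startswith("www."):
--         host = host[4:]
--     while True:
--         tier = _TIER_BY_DOMAIN.get(host)
--         if tier is not None:
--             return tier
--         dot = host.find(".")
--         if dot == -1:
--             return None
--         host = host[dot + 1:]
-- ===== Notes on version B (the rewrite author's own statement) =====
-- stated objective: idiomatic
-- what changed: Replaces three endswith scans over the domain dicts by a walk over the host's dot-boundary suffixes, most-specific-first, each looked up in one combined domain-to-tier dict.
import Mathlib
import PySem

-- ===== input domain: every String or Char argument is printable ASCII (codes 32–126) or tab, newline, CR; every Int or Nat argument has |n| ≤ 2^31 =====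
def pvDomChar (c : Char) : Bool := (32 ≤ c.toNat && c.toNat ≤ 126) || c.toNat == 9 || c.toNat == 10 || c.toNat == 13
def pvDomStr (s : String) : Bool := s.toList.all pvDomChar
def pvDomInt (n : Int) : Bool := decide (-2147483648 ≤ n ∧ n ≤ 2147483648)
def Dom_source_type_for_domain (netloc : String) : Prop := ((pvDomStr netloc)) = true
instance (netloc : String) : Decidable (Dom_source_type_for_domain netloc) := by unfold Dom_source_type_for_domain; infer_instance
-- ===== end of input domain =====

-- B replaces the three endswith scans over the domain dicts by a walk over the
-- host's dot-boundary suffixes, each looked up in one combined domain->tier dict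
-- (objective: alternative/idiomatic; same behaviour proved for all inputs).


-- shared preprocessing, identical lines in A and B:
-- host = netloc.lower().lstrip("."); strip leading "www."
-- (lstrip(".") is ported by hand as dropWhile (· == '.'): exact — it drops the
-- leading characters contained in ".")
def pyPrep (netloc : String) : List Char :=
  let host := (PySem.Chars.lower netloc.toList).dropWhile (fun c => c == '.')
  if PySem.Chars.startswith host ("www.".toList) then host.drop 4 else host

-- ===== PORT A =====
-- host == d or host.endswith("." + d)
def matchesA (host d : List Char) : Bool :=
  host == d || PySem.Chars.endswith host ('.' :: d)

def oemKeys : List (List Char) :=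
  ["orientalmotor.com", "maxongroup.com", "automationdirect.com", "se.com",
   "shop1.us.mitsubishielectric.com"].map String.toList

def distKeys : List (List Char) :=
  ["galco.com", "wolfautomation.com", "motionindustries.com", "newark.com",
   "alliedelec.com", "grainger.com", "shop.iecsupply.com",
   "shop.lakewoodautomation.com", "shop.lakelandengineering.com",
   "shop.fabco-air.com"].map String.toList

def aggKeys : List (List Char) :=
  ["radwell.com", "plccenter.com"].map String.toList

-- each 'for d in dict: if …: return t' loop is find? over that dict's keys
def source_type_for_domain (netloc : String) : Option String :=
  let host := pyPrep netloc
  match oemKeys.find? (fun d => matchesA host d) with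
  | some _ => some "oem"
  | none =>
    match distKeys.find? (fun d => matchesA host d) with
    | some _ => some "distributor"
    | none =>
      match aggKeys.find? (fun d => matchesA host d) with
      | some _ => some "aggregator"
      | none => none

-- ===== PORT B =====
def tierPairs : List (List Char × String) :=
  [("orientalmotor.com", "oem"), ("maxongroup.com", "oem"),
   ("automationdirect.com", "oem"), ("se.com", "oem"),
   ("shop1.us.mitsubishielectric.com", "oem"),
   ("galco.com", "distributor"), ("wolfautomation.com", "distributor"),
   ("motionindustries.com", "distributor"), ("newark.com", "distributor"),
   ("alliedelec.com", "distributor"), ("grainger.com", "distributor"),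
   ("shop.iecsupply.com", "distributor"),
   ("shop.lakewoodautomation.com", "distributor"),
   ("shop.lakelandengineering.com", "distributor"),
   ("shop.fabco-air.com", "distributor"),
   ("radwell.com", "aggregator"), ("plccenter.com", "aggregator")
  ].map (fun p => (p.1.toList, p.2))

def tierDict : PySem.Dict (List Char) String := PySem.Dict.ofList tierPairs

-- dot = host.find("."); host = host[dot + 1:] — ported by hand as one pass that
-- drops everything up to and including the first '.', none when dot == -1 (exact)
def dropLabel : List Char → Option (List Char)
  | [] => none
  | c :: t => if c == '.' then some t else dropLabel t

theorem dropLabel_length : ∀ (h t : List Char), dropLabel h = some t → t.length < h.length := by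
  intro h
  induction h with
  | nil => intro t ht; simp [dropLabel] at ht
  | cons c h ih =>
    intro t ht
    simp only [dropLabel] at ht
    split at ht
    · cases ht; simp
    · exact Nat.lt_trans (ih t ht) (by simp)

-- the while-loop of B: look the current host up, else drop the leading label
def walk (host : List Char) : Option String :=
  match tierDict.get? host with
  | some tier => some tier
  | none =>
    match hdot : dropLabel host with
    | none => none
    | some rest => walk rest
termination_by host.length
decreasing_by exact dropLabel_length _ _ hdot

def source_type_for_domain_alt (netloc : String) : Option String :=
  walk (pyPrep netloc)

-- ===== PRECONDITION & SPEC =====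
def Spec_source_type_for_domain (netloc : String) (out : Option String) : Prop := out = source_type_for_domain_alt netloc
instance (netloc : String) (out : Option String) : Decidable (Spec_source_type_for_domain netloc out) := by unfold Spec_source_type_for_domain; infer_instance

-- ===== CLAIM (what is proved, stated in full; the proofs are below) =====
def Claim_equal_source_type_for_domain : Prop := ∀ (netloc : String), Dom_source_type_for_domain netloc → Spec_source_type_for_domain netloc (source_type_for_domain netloc)

-- ===== LEMMAS AND PROOFS =====

-- A's answer, written as one find? over the combined pair list
def tierFind (host : List Char) : Option String :=
  (tierPairs.find? (fun p => matchesA host p.1)).map (·.2)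

theorem tierPairs_split :
    tierPairs = oemKeys.map (fun d => (d, "oem"))
      ++ distKeys.map (fun d => (d, "distributor"))
      ++ aggKeys.map (fun d => (d, "aggregator")) := by decide

theorem A_eq_tierFind (netloc : String) :
    source_type_for_domain netloc = tierFind (pyPrep netloc) := by
  unfold source_type_for_domain tierFind
  rw [tierPairs_split]
  simp only [List.find?_append, List.find?_map, Function.comp_def]
  cases h1 : oemKeys.find? (fun d => matchesA (pyPrep netloc) d) <;>
    cases h2 : distKeys.find? (fun d => matchesA (pyPrep netloc) d) <;>
      cases h3 : aggKeys.find? (fun d => matchesA (pyPrep netloc) d) <;>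
        simp

-- no listed domain matches another listed domain unless they are the same entry
theorem pairs_disjoint : ∀ p ∈ tierPairs, ∀ q ∈ tierPairs,
    matchesA p.1 q.1 = true → p = q := by decide

-- the dot-boundary-suffix step: host endswith "."+d iff d is equal to, or a
-- dot-boundary suffix of, the残り after dropping the leading label
theorem endswith_step (h d : List Char) :
    ('.' :: d <:+ h) ↔ ∃ t, dropLabel h = some t ∧ (t = d ∨ '.' :: d <:+ t) := by
  induction h with
  | nil => simp [dropLabel]
  | cons c h ih =>
    by_cases hc : c = '.'
    · subst hc
      simp only [dropLabel, beq_self_eq_true, if_true]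
      rw [List.suffix_cons_iff]
      constructor
      · rintro (heq | hs)
        · exact ⟨h, rfl, Or.inl (by injection heq with _ e; exact e.symm)⟩
        · exact ⟨h, rfl, Or.inr hs⟩
      · rintro ⟨t, ht, (rfl | hs)⟩
        · injection ht with e; subst e; exact Or.inl rfl
        · injection ht with e; subst e; exact Or.inr hs
    · have : (c == '.') = false := by simp [hc]
      simp only [dropLabel, this, Bool.false_eq_true, if_false]
      rw [List.suffix_cons_iff, ih]
      constructor
      · rintro (heq | hs)
        · exact absurd (by injection heq with e _; exact e.symm) hc
        · exact hs
      · exact Or.inr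

theorem matchesA_step_none (h d : List Char) (hdot : dropLabel h = none) :
    matchesA h d = (h == d) := by
  unfold matchesA
  have : PySem.Chars.endswith h ('.' :: d) = false := by
    rw [← Bool.not_eq_true, PySem.Chars.endswith_iff, endswith_step]
    rintro ⟨t, ht, _⟩; rw [hdot] at ht; cases ht
  simp [this]

theorem matchesA_step_some (h t d : List Char) (hdot : dropLabel h = some t)
    (hne : (h == d) = false) : matchesA h d = matchesA t d := by
  unfold matchesA
  rw [hne, Bool.false_or, Bool.eq_iff_iff]
  rw [PySem.Chars.endswith_iff, endswith_step]
  constructor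
  · rintro ⟨t', ht', hd⟩
    rw [hdot] at ht'; cases ht'
    rw [Bool.or_eq_true, beq_iff_eq]
    cases hd with
    | inl e => exact Or.inl e
    | inr e => exact Or.inr ((PySem.Chars.endswith_iff _ _).2 e)
  · intro hm
    rw [Bool.or_eq_true, beq_iff_eq] at hm
    refine ⟨t, hdot, ?_⟩
    cases hm with
    | inl e => exact Or.inl e
    | inr e => exact Or.inr ((PySem.Chars.endswith_iff _ _).1 e)

theorem find?_congr' {α : Type} (p q : α → Bool) (l : List α)
    (h : ∀ a ∈ l, p a = q a) : l.find? p = l.find? q := by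
  induction l with
  | nil => rfl
  | cons a l ih =>
    simp only [List.find?]
    rw [h a (List.mem_cons_self)]
    cases hq : q a
    · simp only []
      exact ih (fun b hb => h b (List.mem_cons_of_mem _ hb))
    · rfl

theorem get?_mk_eq_find? (pairs : List (List Char × String)) (x : List Char) :
    (PySem.Dict.mk pairs).get? x = (pairs.find? (fun p => p.1 == x)).map (·.2) := by
  induction pairs with
  | nil => rfl
  | cons a l ih =>
    rw [show (a :: l) = ((a.1, a.2) :: l) by rfl]
    rw [PySem.Dict.get?_mk_cons]
    simp only [List.find?]
    cases ha : (a.1 == x)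
    · simpa using ih
    · rfl

-- dict lookup on tierDict is first-match find? over tierPairs
theorem get?_eq_find? (x : List Char) :
    tierDict.get? x = (tierPairs.find? (fun p => p.1 == x)).map (·.2) := by
  have hmk : tierDict = PySem.Dict.mk tierPairs := by decide
  rw [hmk, get?_mk_eq_find?]

theorem matchesA_of_eq (a b : List Char) (e : a = b) : matchesA a b = true := by
  unfold matchesA; simp [e]

theorem matchesA_of_suffix (a b : List Char) (h : '.' :: b <:+ a) : matchesA a b = true := by
  unfold matchesA
  rw [(PySem.Chars.endswith_iff _ _).2 h]
  simp

-- at most one entry matches any host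
theorem matches_unique (x : List Char) (p q : List Char × String)
    (hp : p ∈ tierPairs) (hq : q ∈ tierPairs)
    (hmp : matchesA x p.1 = true) (hmq : matchesA x q.1 = true) : p = q := by
  unfold matchesA at hmp hmq
  rw [Bool.or_eq_true, beq_iff_eq, PySem.Chars.endswith_iff] at hmp hmq
  cases hmp with
  | inl ep =>
    cases hmq with
    | inl eq' => exact pairs_disjoint p hp q hq (matchesA_of_eq _ _ (ep.symm.trans eq'))
    | inr sq =>
      subst ep
      exact pairs_disjoint p hp q hq (matchesA_of_suffix _ _ sq)
  | inr sp =>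
    cases hmq with
    | inl eq' =>
      subst eq'
      exact (pairs_disjoint q hq p hp (matchesA_of_suffix _ _ sp)).symm
    | inr sq =>
      cases List.suffix_or_suffix_of_suffix sp sq with
      | inl hle =>
        rw [List.suffix_cons_iff] at hle
        cases hle with
        | inl e =>
          have e' : p.1 = q.1 := by injection e
          exact pairs_disjoint p hp q hq (matchesA_of_eq _ _ e')
        | inr hs =>
          exact (pairs_disjoint q hq p hp (matchesA_of_suffix _ _ hs)).symm
      | inr hle =>
        rw [List.suffix_cons_iff] at hle
        cases hle with
        | inl e =>
          have e' : q.1 = p.1 := by injection e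
          exact pairs_disjoint p hp q hq (matchesA_of_eq _ _ e'.symm)
        | inr hs =>
          exact pairs_disjoint p hp q hq (matchesA_of_suffix _ _ hs)

theorem walk_eq_tierFind : ∀ host, walk host = tierFind host := by
  intro host
  induction host using walk.induct with
  | case1 host tier heq =>
    have hTF : tierFind host = some tier := by
      rw [get?_eq_find?] at heq
      obtain ⟨p, hfind, hp2⟩ := Option.map_eq_some_iff.1 heq
      have hpmem := List.mem_of_find?_eq_some hfind
      have hpeq : p.1 = host := by
        have := List.find?_some hfind
        rwa [beq_iff_eq] at this
      have hmp : matchesA host p.1 = true := matchesA_of_eq _ _ hpeq.symm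
      have hsome : (tierPairs.find? (fun q => matchesA host q.1)).isSome := by
        rw [List.find?_isSome]; exact ⟨p, hpmem, hmp⟩
      obtain ⟨q, hq⟩ := Option.isSome_iff_exists.1 hsome
      have hqmem := List.mem_of_find?_eq_some hq
      have hmq : matchesA host q.1 = true := by
        have := List.find?_some hq; simpa using this
      have hqp : q = p := matches_unique host q p hqmem hpmem hmq hmp
      unfold tierFind
      rw [hq, hqp, Option.map_some, hp2]
    rw [walk, heq, hTF]
  | case2 host h1 h2 =>
    have hTF : tierFind host = none := by
      unfold tierFind
      rw [get?_eq_find?, Option.map_eq_none_iff, List.find?_eq_none] at h1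
      rw [Option.map_eq_none_iff, List.find?_eq_none]
      intro p hp
      rw [Bool.not_eq_true, matchesA_step_none host p.1 h2, beq_eq_false_iff_ne]
      intro hc
      have := h1 p hp
      rw [Bool.not_eq_true, beq_eq_false_iff_ne] at this
      exact this hc.symm
    rw [walk, h1, h2, hTF]
  | case3 host h1 rest h2 ih =>
    have hTF : tierFind host = tierFind rest := by
      unfold tierFind
      rw [get?_eq_find?, Option.map_eq_none_iff, List.find?_eq_none] at h1
      congr 1
      apply find?_congr'
      intro p hp
      apply matchesA_step_some host rest p.1 h2
      have := h1 p hp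
      rw [Bool.not_eq_true, beq_eq_false_iff_ne] at this
      rw [beq_eq_false_iff_ne]
      exact fun e => this e.symm
    rw [walk, h1, h2, hTF]
    exact ih

-- ===== VERDICT (by name: the statement is the Claim_ definition above) =====
theorem source_type_for_domain_spec : Claim_equal_source_type_for_domain := by
  intro netloc _
  unfold Spec_source_type_for_domain source_type_for_domain_alt
  rw [A_eq_tierFind, walk_eq_tierFind]
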